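-- pv_equiv track=rewrite | github.com/Nura-21/Python-II-Fall-2023 | hw4/q3/5.py | find_monotonicity_changes
-- ===== SOURCE A (Python) =====
-- def find_monotonicity_changes(arr):
--     changes = []
--
--     if len(arr) < 2:
--         return changes
--
--     is_increasing = None
--
--     for i in range(1, len(arr)):
--         if arr[i] > arr[i - 1]:
--             if is_increasing is None:
--                 is_increasing = True
--             elif not is_increasing:
--                 changes.append(i)
--                 is_increasing = True
--         elif arr[i] < arr[i - 1]:
--             if is_increasing is None:
--                 is_increasing = False
--             elif is_increasing:
--                 changes.append(i)
--                 is_increasing = False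
--
--     return changes
-- ===== SOURCE B (Python) =====
-- def find_monotonicity_changes(arr):
--     # run-length compress equal neighbours (keeping indices), then mark the
--     # local extrema of the compressed sequence with a stateless triple window
--     comp = []
--     for i, v in enumerate(arr):
--         if not comp or comp[-1][1] != v:
--             comp.append((i, v))
--     return [k for (_, a), (_, b), (k, c) in zip(comp, comp[1:], comp[2:])
--             if (b > a) != (c > b)]
-- ===== Notes on version B (the rewrite author's own statement) =====
-- stated objective: alternative
-- what changed: Replaced A's single fused scan with an is_increasing state flag by run-length compression of equal adjacent values (keeping indices) followed by stateless local-extremum detection over a sliding three-element window of the compressed sequence.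
import Mathlib
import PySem

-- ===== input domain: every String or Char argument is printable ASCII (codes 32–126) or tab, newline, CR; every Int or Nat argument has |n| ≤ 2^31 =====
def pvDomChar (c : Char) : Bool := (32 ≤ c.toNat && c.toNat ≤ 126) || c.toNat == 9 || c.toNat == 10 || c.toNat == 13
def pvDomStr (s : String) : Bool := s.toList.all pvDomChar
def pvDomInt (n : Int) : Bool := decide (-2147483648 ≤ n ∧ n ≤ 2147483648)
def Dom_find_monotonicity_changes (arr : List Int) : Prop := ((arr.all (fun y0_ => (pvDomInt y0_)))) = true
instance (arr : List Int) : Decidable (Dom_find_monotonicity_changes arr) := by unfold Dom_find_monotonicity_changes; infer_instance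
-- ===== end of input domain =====

-- B replaces A's fused stateful scan by run-length compressing equal neighbours
-- (keeping indices) and then marking local extrema of the compressed sequence with
-- a stateless three-element window (objective: alternative algorithm; same O(n) cost).

-- ===== PORT A =====
-- loop body of A's for-loop; state = (changes, is_increasing)
def pvStepA (arr : List Int) (st : List Int × Option Bool) (i : Int) : List Int × Option Bool :=
  if PySem.List.pyGetD arr i 0 > PySem.List.pyGetD arr (i - 1) 0 then
    match st.2 with
    | none => (st.1, some true)
    | some b => if !b then (st.1 ++ [i], some true) else st
  else if PySem.List.pyGetD arr i 0 < PySem.List.pyGetD arr (i - 1) 0 then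
    match st.2 with
    | none => (st.1, some false)
    | some b => if b then (st.1 ++ [i], some false) else st
  else st

def find_monotonicity_changes (arr : List Int) : List Int :=
  let changes : List Int := []
  if arr.length < 2 then changes
  else ((PySem.List.pyRange 1 arr.length 1).foldl (pvStepA arr) (changes, none)).1

-- ===== PORT B =====
-- loop body of B's compression loop: append (i, v) unless comp's last value equals v
def pvCompStep (comp : List (Int × Int)) (p : Int × Int) : List (Int × Int) :=
  if comp = [] ∨ (PySem.List.pyGetD comp (-1) (0, 0)).2 ≠ p.2 then comp ++ [p] else comp

def find_monotonicity_changes_alt (arr : List Int) : List Int :=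
  let comp := (PySem.List.enumerate arr 0).foldl pvCompStep []
  ((comp.zip (comp.drop 1)).zip (comp.drop 2)).filterMap
    (fun x => if (decide (x.1.2.2 > x.1.1.2)) ≠ (decide (x.2.2 > x.1.2.2))
              then some x.2.1 else none)

-- ===== PRECONDITION & SPEC =====
def Spec_find_monotonicity_changes (arr : List Int) (out : List Int) : Prop := out = find_monotonicity_changes_alt arr
instance (arr : List Int) (out : List Int) : Decidable (Spec_find_monotonicity_changes arr out) := by unfold Spec_find_monotonicity_changes; infer_instance

-- ===== CLAIM =====
def Claim_equal_find_monotonicity_changes : Prop := ∀ (arr : List Int), Dom_find_monotonicity_changes arr → Spec_find_monotonicity_changes arr (find_monotonicity_changes arr)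

-- ===== LEMMAS AND PROOFS =====

-- reference recursion: A's loop written structurally over the suffix of values
def pvRef (j pv : Int) (inc : Option Bool) : List Int → List Int
  | [] => []
  | v :: t =>
    if pv < v then
      match inc with
      | some false => j :: pvRef (j + 1) v (some true) t
      | _ => pvRef (j + 1) v (some true) t
    else if v < pv then
      match inc with
      | some true => j :: pvRef (j + 1) v (some false) t
      | _ => pvRef (j + 1) v (some false) t
    else pvRef (j + 1) v inc t

-- compression written structurally: previous value pv, next index j
def pvCompFrom (j pv : Int) : List Int → List (Int × Int)
  | [] => []
  | v :: t => if v = pv then pvCompFrom (j + 1) pv t else (j, v) :: pvCompFrom (j + 1) v t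

-- triple-window extremum detection, last two values p q carried as state
def pvW2 (p q : Int) : List (Int × Int) → List Int
  | [] => []
  | (k, c) :: t => if (decide (q > p)) ≠ (decide (c > q)) then k :: pvW2 q c t else pvW2 q c t

def pvW1 (q : Int) : List (Int × Int) → List Int
  | [] => []
  | (_, c) :: t => pvW2 q c t

lemma pv_main2 (t : List Int) : ∀ (j p pv : Int) (b : Bool), decide (pv > p) = b →
    pvRef j pv (some b) t = pvW2 p pv (pvCompFrom j pv t) := by
  induction t with
  | nil => intro j p pv b _; simp [pvRef, pvCompFrom, pvW2]
  | cons v t ih =>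
    intro j p pv b hb
    rcases lt_trichotomy v pv with hc | hc | hc
    · have hrec := ih (j + 1) pv v false (by simp; omega)
      have hd : decide (v > pv) = false := by simp; omega
      simp only [pvRef, pvCompFrom, if_neg (show ¬ pv < v by omega), if_pos hc,
        if_neg (show ¬ v = pv by omega), pvW2, hb, hd]
      cases b <;> simp [hrec]
    · subst hc
      simp only [pvRef, pvCompFrom, lt_irrefl, if_pos rfl]
      exact ih (j + 1) p v b hb
    · have hrec := ih (j + 1) pv v true (by simp; omega)
      have hd : decide (v > pv) = true := by simp; omega
      simp only [pvRef, pvCompFrom, if_pos hc, if_neg (show ¬ v = pv by omega), pvW2, hb, hd]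
      cases b <;> simp [hrec]

lemma pv_main1 (t : List Int) : ∀ (j pv : Int),
    pvRef j pv none t = pvW1 pv (pvCompFrom j pv t) := by
  induction t with
  | nil => intro j pv; simp [pvRef, pvCompFrom, pvW1]
  | cons v t ih =>
    intro j pv
    rcases lt_trichotomy v pv with hc | hc | hc
    · simp only [pvRef, pvCompFrom, if_neg (show ¬ pv < v by omega), if_pos hc,
        if_neg (show ¬ v = pv by omega), pvW1]
      exact pv_main2 t (j + 1) pv v false (by simp; omega)
    · subst hc
      simp only [pvRef, pvCompFrom, lt_irrefl, if_pos rfl]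
      exact ih (j + 1) v
    · simp only [pvRef, pvCompFrom, if_pos hc, if_neg (show ¬ v = pv by omega), pvW1]
      exact pv_main2 t (j + 1) pv v true (by simp; omega)

-- A's foldl over range(k, len) equals pvRef on the suffix
lemma pv_A_loop (arr : List Int) (m : Nat) : ∀ (k : Nat) (c : List Int) (inc : Option Bool),
    1 ≤ k → k + m = arr.length →
    ((PySem.List.pyRange k arr.length 1).foldl (pvStepA arr) (c, inc)).1
      = c ++ pvRef k (arr.getD (k - 1) 0) inc (arr.drop k) := by
  induction m with
  | zero =>
    intro k c inc hk hlen
    have h1 : (arr.length : Int) ≤ (k : Int) := by omega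
    rw [PySem.List.pyRange_one_eq_nil h1]
    simp [List.drop_eq_nil_of_le (by omega : arr.length ≤ k), pvRef]
  | succ m ih =>
    intro k c inc hk hlen
    have hklt : k < arr.length := by omega
    have h1 : (k : Int) < (arr.length : Int) := by exact_mod_cast hklt
    have hget : PySem.List.pyGetD arr (k : Int) 0 = arr[k] := by
      rw [PySem.List.pyGetD_natCast]; exact List.getD_eq_getElem _ _ hklt
    have hgetp : PySem.List.pyGetD arr ((k : Int) - 1) 0 = arr.getD (k - 1) 0 := by
      have h : ((k : Int) - 1) = ((k - 1 : Nat) : Int) := by omega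
      rw [h, PySem.List.pyGetD_natCast]
    have hdrop : arr.drop k = arr[k] :: arr.drop (k + 1) := List.drop_eq_getElem_cons hklt
    have hprev : arr.getD (k + 1 - 1) 0 = arr[k] := by
      rw [Nat.add_sub_cancel]; exact List.getD_eq_getElem _ _ hklt
    have hih : ∀ (c' : List Int) (inc' : Option Bool),
        ((PySem.List.pyRange ((k : Int) + 1) arr.length 1).foldl (pvStepA arr) (c', inc')).1
          = c' ++ pvRef ((k : Int) + 1) arr[k] inc' (arr.drop (k + 1)) := by
      intro c' inc'
      have hcast : ((k : Int) + 1) = ((k + 1 : Nat) : Int) := by push_cast; ring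
      rw [hcast, ih (k + 1) c' inc' (by omega) (by omega), hprev]
    rw [PySem.List.pyRange_one_cons h1, List.foldl_cons, hdrop]
    rcases lt_trichotomy (arr.getD (k - 1) 0) (arr[k]) with hc | hc | hc
    · have e : pvStepA arr (c, inc) k
          = ((if inc = some false then c ++ [(k : Int)] else c), some true) := by
        unfold pvStepA
        rw [hget, hgetp, if_pos hc]
        rcases inc with _ | b
        · simp
        · cases b <;> simp
      rw [e]
      rcases inc with _ | b
      · rw [hih]
        simp only [pvRef, if_pos hc]
        simp
      · cases b <;>
          · rw [hih]
            simp only [pvRef, if_pos hc]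
            simp
    · have e : pvStepA arr (c, inc) k = (c, inc) := by
        unfold pvStepA
        rw [hget, hgetp, if_neg (by omega), if_neg (by omega)]
      rw [e, hih]
      simp only [pvRef, if_neg (show ¬ arr.getD (k - 1) 0 < arr[k] by omega),
        if_neg (show ¬ arr[k] < arr.getD (k - 1) 0 by omega)]
    · have e : pvStepA arr (c, inc) k
          = ((if inc = some true then c ++ [(k : Int)] else c), some false) := by
        unfold pvStepA
        rw [hget, hgetp, if_neg (by omega), if_pos hc]
        rcases inc with _ | b
        · simp
        · cases b <;> simp
      rw [e]
      rcases inc with _ | b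
      · rw [hih]
        simp only [pvRef, if_neg (show ¬ arr.getD (k - 1) 0 < arr[k] by omega), if_pos hc]
        simp
      · cases b <;>
          · rw [hih]
            simp only [pvRef, if_neg (show ¬ arr.getD (k - 1) 0 < arr[k] by omega), if_pos hc]
            simp

-- B's foldl compression equals pvCompFrom past a nonempty accumulator
lemma pv_B_comp (t : List Int) : ∀ (j : Int) (acc : List (Int × Int)) (h : acc ≠ []),
    (PySem.List.enumerate t j).foldl pvCompStep acc
      = acc ++ pvCompFrom j (acc.getLast h).2 t := by
  induction t with
  | nil => intro j acc h; simp [PySem.List.enumerate_nil, pvCompFrom]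
  | cons v t ih =>
    intro j acc h
    rw [PySem.List.enumerate_cons]
    simp only [List.foldl_cons, pvCompStep, PySem.List.pyGetD_neg_one _ _ h]
    by_cases hv : v = (acc.getLast h).2
    · rw [if_neg (by simp [h, hv])]
      rw [ih (j + 1) acc h]
      simp [pvCompFrom, hv]
    · rw [if_pos (by simp [hv]; omega)]
      have hne : acc ++ [(j, v)] ≠ [] := by simp
      rw [ih (j + 1) (acc ++ [(j, v)]) hne]
      have : ((acc ++ [(j, v)]).getLast hne).2 = v := by simp
      rw [this]
      simp [pvCompFrom, hv]

-- the zip-zip-filterMap triple window equals pvW2 once the first two entries are fixed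
lemma pv_trip (t : List (Int × Int)) : ∀ (x y : Int × Int),
    (((x :: y :: t).zip ((x :: y :: t).drop 1)).zip ((x :: y :: t).drop 2)).filterMap
      (fun x => if (decide (x.1.2.2 > x.1.1.2)) ≠ (decide (x.2.2 > x.1.2.2))
                then some x.2.1 else none)
      = pvW2 x.2 y.2 t := by
  induction t with
  | nil => intro x y; simp [pvW2]
  | cons z t ih =>
    intro x y
    have := ih y z
    simp only [List.drop, List.zip_cons_cons, List.filterMap_cons] at this ⊢
    rw [this]
    by_cases hc : (decide (y.2 > x.2)) ≠ (decide (z.2 > y.2)) <;> simp [hc, pvW2]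

theorem find_monotonicity_changes_spec : Claim_equal_find_monotonicity_changes := by
  intro arr _
  unfold Spec_find_monotonicity_changes
  match arr with
  | [] => rfl
  | [a] =>
    simp [find_monotonicity_changes, find_monotonicity_changes_alt,
      PySem.List.enumerate_cons, PySem.List.enumerate_nil, pvCompStep]
  | a :: b :: rest =>
    have hlen : ¬ (a :: b :: rest).length < 2 := by simp
    unfold find_monotonicity_changes find_monotonicity_changes_alt
    rw [if_neg hlen]
    -- A side
    have hA := pv_A_loop (a :: b :: rest) ((a :: b :: rest).length - 1) 1 [] none
      (by omega) (by simp; omega)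
    simp only [Nat.cast_one] at hA
    rw [hA]
    -- B side
    have hcons : PySem.List.enumerate (a :: b :: rest) 0
        = (0, a) :: PySem.List.enumerate (b :: rest) 1 := by
      rw [PySem.List.enumerate_cons]; norm_num
    have hstep : pvCompStep [] ((0 : Int), a) = [((0 : Int), a)] := by
      simp [pvCompStep]
    have hne : ([((0 : Int), a)] : List (Int × Int)) ≠ [] := by simp
    have hcomp : (PySem.List.enumerate (a :: b :: rest) 0).foldl pvCompStep []
        = [((0 : Int), a)] ++ pvCompFrom 1 a (b :: rest) := by
      rw [hcons, List.foldl_cons, hstep, pv_B_comp (b :: rest) 1 [((0 : Int), a)] hne]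
      rfl
    simp only [hcomp]
    -- reduce both sides to pvW1 / pvW2
    have hAval : (a :: b :: rest).getD 0 0 = a := rfl
    have hAdrop : (a :: b :: rest).drop 1 = b :: rest := rfl
    simp only [Nat.sub_self, hAval, hAdrop]
    rw [pv_main1 (b :: rest) 1 a]
    cases hcf : pvCompFrom 1 a (b :: rest) with
    | nil => simp [pvW1]
    | cons y t => simp only [List.singleton_append, List.nil_append, pv_trip t (0, a) y, pvW1]
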